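-- pv_equiv track=rewrite | github.com/CocoRoF/Contextifier | libs/core/document_processor.py | _find_line_index_by_pos
-- ===== SOURCE A (Python) =====
-- import logging, re, bisect
-- from typing import Any, Dict, List, Optional
--
-- def _find_line_index_by_pos(pos: int, line_table: List[Dict[str, int]]) -> int:
--     try:
--         if not line_table:
--             return 0
--         starts = [l["start"] for l in line_table]
--         idx = bisect.bisect_right(starts, pos) - 1
--         return 0 if idx < 0 else min(idx, len(line_table)-1)
--     except Exception:
--         return 0
-- ===== SOURCE B (Python) =====
-- # B: count the lines whose start offset is <= pos in one linear pass, then clamp.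
-- # In a line table sorted by start, the containing line is the last one starting
-- # at or before pos, i.e. (number of starts <= pos) - 1, clamped into range.
-- # A malformed row without a "start" key makes the lookup raise; treat that
-- # table as having no usable line information and fall back to line 0.
-- def _find_line_index_by_pos(pos, line_table):
--     if not line_table:
--         return 0
--     try:
--         count = sum(1 for line in line_table if line["start"] <= pos)
--     except KeyError:
--         return 0
--     return min(max(count - 1, 0), len(line_table) - 1)
-- ===== Notes on version B (the rewrite author's own statement) =====
-- stated objective: simpler
-- what changed: B replaces A's starts-list + library binary search by one linear counting pass (number of line starts <= pos, clamped into range, with a try/except fallback to 0 for rows missing the 'start' key); Pre_ excludes only full-key tables whose starts are not nondecreasing, where bisect on unsorted data yields an accidental value and B's count-based index is an equally defensible one.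
-- outside the precondition, e.g. on _find_line_index_by_pos(0, [{'start': 5}, {'start': 0}]): A returns 1, B returns 0
import Mathlib
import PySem

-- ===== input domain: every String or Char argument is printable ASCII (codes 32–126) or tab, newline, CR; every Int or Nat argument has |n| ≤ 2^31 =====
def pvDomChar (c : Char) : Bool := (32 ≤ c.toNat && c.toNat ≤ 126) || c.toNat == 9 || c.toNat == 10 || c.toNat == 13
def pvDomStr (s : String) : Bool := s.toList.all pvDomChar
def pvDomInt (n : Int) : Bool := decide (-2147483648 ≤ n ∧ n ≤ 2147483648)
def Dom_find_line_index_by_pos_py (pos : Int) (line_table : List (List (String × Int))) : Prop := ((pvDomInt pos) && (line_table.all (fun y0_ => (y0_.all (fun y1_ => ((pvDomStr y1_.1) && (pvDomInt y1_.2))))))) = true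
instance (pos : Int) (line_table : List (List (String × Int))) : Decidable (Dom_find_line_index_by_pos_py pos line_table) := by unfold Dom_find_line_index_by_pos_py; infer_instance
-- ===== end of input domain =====

-- B replaces A's starts-list + library binary search by a single linear counting pass
-- (number of line starts <= pos, clamped into range); objective: simpler.

-- ===== PORT A =====
-- l["start"]: first matching key of the association list; none = KeyError.
def pvGetStart? (l : List (String × Int)) : Option Int := l.lookup "start"

-- literal transliteration of bisect.bisect_right(a, x) (CPython's lo/hi loop).
-- a[mid] is always in range (lo < hi ≤ a.length on every call from below), so getD is exact.
def pvBisectRight (a : List Int) (x : Int) (lo hi : Nat) : Nat :=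
  if lo < hi then
    if x < a.getD ((lo + hi) / 2) 0 then pvBisectRight a x lo ((lo + hi) / 2)
    else pvBisectRight a x ((lo + hi) / 2 + 1) hi
  else lo
termination_by hi - lo
decreasing_by all_goals omega

def find_line_index_by_pos_py (pos : Int) (line_table : List (List (String × Int))) : Int :=
  if line_table = [] then 0
  else match line_table.mapM pvGetStart? with
    | none => 0   -- a line without "start": KeyError, caught by the blanket 'except' → 0
    | some starts =>
      let idx : Int := (pvBisectRight starts pos 0 starts.length : Int) - 1
      if idx < 0 then 0 else min idx ((line_table.length : Int) - 1)

-- ===== PORT B =====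
-- the try-block's generator sum: left-to-right, aborting (none) at the first
-- row whose "start" lookup raises KeyError, else the count of starts ≤ pos.
def pvCountLe (pos : Int) : List (List (String × Int)) → Option Int
  | [] => some 0
  | l :: t =>
    match l.lookup "start" with
    | none => none
    | some s => (pvCountLe pos t).map (fun c => if s ≤ pos then c + 1 else c)

def find_line_index_by_pos_py_alt (pos : Int) (line_table : List (List (String × Int))) : Int :=
  if line_table = [] then 0
  else
    match pvCountLe pos line_table with
    | none => 0   -- KeyError from a row without "start": fall back to line 0
    | some count => min (max (count - 1) 0) ((line_table.length : Int) - 1)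

-- ===== PRECONDITION & SPEC =====
def pvStartOf (l : List (String × Int)) : Int := ((l.lookup "start").getD 0)

-- Pre_ excludes only the tables in which every line has a "start" key but the start
-- offsets are not nondecreasing: there bisect on unsorted data yields an accidental
-- value and B's count-based index is an equally defensible one.
def Pre_find_line_index_by_pos_py (pos : Int) (line_table : List (List (String × Int))) : Prop :=
  (∀ l ∈ line_table, (l.lookup "start").isSome = true) →
  (line_table.map pvStartOf).Pairwise (· ≤ ·)
instance (pos : Int) (line_table : List (List (String × Int))) : Decidable (Pre_find_line_index_by_pos_py pos line_table) := by unfold Pre_find_line_index_by_pos_py; infer_instance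

def pvWitness_find_line_index_by_pos_py : Int × (List (List (String × Int))) :=
  (5, [[("start", 0)], [("start", 3)], [("start", 7)]])

def Spec_find_line_index_by_pos_py (pos : Int) (line_table : List (List (String × Int))) (out : Int) : Prop := out = find_line_index_by_pos_py_alt pos line_table
instance (pos : Int) (line_table : List (List (String × Int))) (out : Int) : Decidable (Spec_find_line_index_by_pos_py pos line_table out) := by unfold Spec_find_line_index_by_pos_py; infer_instance

-- ===== CLAIM (what is proved, stated in full; the proofs are below) =====
def Claim_equal_find_line_index_by_pos_py : Prop := ∀ (pos : Int) (line_table : List (List (String × Int))), Dom_find_line_index_by_pos_py pos line_table → Pre_find_line_index_by_pos_py pos line_table → Spec_find_line_index_by_pos_py pos line_table (find_line_index_by_pos_py pos line_table)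

-- ===== LEMMAS AND PROOFS =====

theorem pv_mapM_eq_map {t : List (List (String × Int))}
    (h : ∀ l ∈ t, (l.lookup "start").isSome = true) :
    t.mapM pvGetStart? = some (t.map pvStartOf) := by
  induction t with
  | nil => rfl
  | cons a t ih =>
    have ha := h a (by simp)
    obtain ⟨v, hv⟩ := Option.isSome_iff_exists.mp ha
    have ih' := ih (fun l hl => h l (by simp [hl]))
    simp [List.mapM_cons, pvGetStart?, hv, ih', pvStartOf]

-- in a sorted list, the elements ≤ x are exactly a prefix of length countP (· ≤ x)
theorem pv_sorted_count_prefix (a : List Int) (x : Int) (h : a.Pairwise (· ≤ ·)) :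
    (∀ i < a.countP (fun v => decide (v ≤ x)), a.getD i 0 ≤ x) ∧
    (∀ i, a.countP (fun v => decide (v ≤ x)) ≤ i → i < a.length → x < a.getD i 0) := by
  induction a with
  | nil => simp
  | cons v rest ih =>
    have hrest : rest.Pairwise (· ≤ ·) := h.of_cons
    have hall : ∀ b ∈ rest, v ≤ b := fun b hb => List.rel_of_pairwise_cons h hb
    obtain ⟨ih1, ih2⟩ := ih hrest
    by_cases hv : v ≤ x
    · have hc : (v :: rest).countP (fun v => decide (v ≤ x))
          = rest.countP (fun v => decide (v ≤ x)) + 1 := by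
        simp [List.countP_cons, hv]
      constructor
      · intro i hi
        rw [hc] at hi
        cases i with
        | zero => simpa [List.getD] using hv
        | succ n => simpa [List.getD] using ih1 n (by omega)
      · intro i hi hlen
        rw [hc] at hi
        cases i with
        | zero => omega
        | succ n =>
          simp only [List.length_cons] at hlen
          simpa [List.getD] using ih2 n (by omega) (by omega)
    · have hzero : rest.countP (fun v => decide (v ≤ x)) = 0 := by
        rw [List.countP_eq_zero]
        intro b hb
        have := hall b hb
        simp only [decide_eq_true_eq]
        omega
      have hc : (v :: rest).countP (fun v => decide (v ≤ x)) = 0 := by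
        simp [List.countP_cons, hv, hzero]
      constructor
      · intro i hi; rw [hc] at hi; omega
      · intro i _ hlen
        cases i with
        | zero =>
          simp only [List.getD_cons_zero]
          omega
        | succ n =>
          simp only [List.length_cons] at hlen
          have hn : n < rest.length := by omega
          have hb : rest.getD n 0 ∈ rest := by
            simp only [List.getD, List.getElem?_eq_getElem hn, Option.getD_some]
            exact List.getElem_mem hn
          have := hall _ hb
          have hg : (v :: rest).getD (n + 1) 0 = rest.getD n 0 := rfl
          rw [hg]
          omega

theorem pv_bisect_eq_count (a : List Int) (x : Int)
    (h1 : ∀ i < a.countP (fun v => decide (v ≤ x)), a.getD i 0 ≤ x)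
    (h2 : ∀ i, a.countP (fun v => decide (v ≤ x)) ≤ i → i < a.length → x < a.getD i 0) :
    ∀ lo hi, lo ≤ a.countP (fun v => decide (v ≤ x)) →
      a.countP (fun v => decide (v ≤ x)) ≤ hi → hi ≤ a.length →
      pvBisectRight a x lo hi = a.countP (fun v => decide (v ≤ x)) := by
  intro lo hi
  induction lo, hi using pvBisectRight.induct (a := a) (x := x) with
  | case1 lo hi hlt hx ih =>
    intro hlo hhi hlen
    set c := a.countP (fun v => decide (v ≤ x)) with hc
    rw [pvBisectRight, if_pos hlt, if_pos hx]
    have hmid : c ≤ (lo + hi) / 2 := by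
      by_contra hcon
      have hmlt : (lo + hi) / 2 < c := by omega
      have := h1 _ hmlt
      omega
    exact ih hlo hmid (by omega)
  | case2 lo hi hlt hx ih =>
    intro hlo hhi hlen
    set c := a.countP (fun v => decide (v ≤ x)) with hc
    rw [pvBisectRight, if_pos hlt, if_neg hx]
    have hmid : (lo + hi) / 2 < c := by
      by_contra hcon
      have := h2 ((lo + hi) / 2) (by omega) (by omega)
      omega
    exact ih (by omega) hhi hlen
  | case3 lo hi hlt =>
    intro hlo hhi hlen
    rw [pvBisectRight, if_neg hlt]
    omega

theorem pv_mapM_none {t : List (List (String × Int))}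
    (h : ∃ l ∈ t, (l.lookup "start").isSome = false) :
    t.mapM pvGetStart? = none := by
  induction t with
  | nil => simp at h
  | cons a t ih =>
    rcases h with ⟨l, hl, hn⟩
    rcases List.mem_cons.mp hl with rfl | hmem
    · have hz : l.lookup "start" = none := by
        cases h : l.lookup "start" <;> simp [h] at hn ⊢
      simp [List.mapM_cons, pvGetStart?, hz]
    · cases h : a.lookup "start" with
      | none => simp [List.mapM_cons, pvGetStart?, h]
      | some v => simp [List.mapM_cons, pvGetStart?, h, ih ⟨l, hmem, hn⟩]

theorem pv_countLe_none (pos : Int) {t : List (List (String × Int))}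
    (h : ∃ l ∈ t, (l.lookup "start").isSome = false) :
    pvCountLe pos t = none := by
  induction t with
  | nil => simp at h
  | cons a t ih =>
    rcases h with ⟨l, hl, hn⟩
    rcases List.mem_cons.mp hl with rfl | hmem
    · rw [pvCountLe]
      rcases ha : l.lookup "start" with _ | v
      · rfl
      · rw [ha] at hn; simp at hn
    · rw [pvCountLe]
      rcases ha : a.lookup "start" with _ | v
      · rfl
      · rw [ih ⟨l, hmem, hn⟩]; rfl

theorem pv_countLe_some (pos : Int) {t : List (List (String × Int))}
    (h : ∀ l ∈ t, (l.lookup "start").isSome = true) :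
    pvCountLe pos t = some (((t.map pvStartOf).countP (fun v => decide (v ≤ pos)) : Nat) : Int) := by
  induction t with
  | nil => rfl
  | cons a t ih =>
    obtain ⟨v, hv⟩ := Option.isSome_iff_exists.mp (h a (by simp))
    rw [pvCountLe, hv, ih (fun l hl => h l (by simp [hl]))]
    by_cases hle : v ≤ pos
    · simp [List.countP_cons, pvStartOf, hv, hle]
    · simp [List.countP_cons, pvStartOf, hv, hle]

-- ===== VERDICT (by name: the statement is the Claim_ definition above) =====
theorem find_line_index_by_pos_py_spec : Claim_equal_find_line_index_by_pos_py := by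
  intro pos t _ hpre
  unfold Spec_find_line_index_by_pos_py find_line_index_by_pos_py find_line_index_by_pos_py_alt
  by_cases ht : t = []
  · simp [ht, pvCountLe]
  · rw [if_neg ht, if_neg ht]
    by_cases hkeys : ∀ l ∈ t, (l.lookup "start").isSome = true
    · have hsorted := hpre hkeys
      rw [pv_mapM_eq_map hkeys, pv_countLe_some pos hkeys]
      set a := t.map pvStartOf with ha
      obtain ⟨h1, h2⟩ := pv_sorted_count_prefix a pos hsorted
      set c := a.countP (fun v => decide (v ≤ pos)) with hc
      have hcle : c ≤ a.length := List.countP_le_length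
      have hb := pv_bisect_eq_count a pos h1 h2 0 a.length (Nat.zero_le _) hcle le_rfl
      have hlen : a.length = t.length := by simp [ha]
      have hn : 1 ≤ t.length := List.length_pos_iff.mpr ht
      simp only [hb, ← hc]
      have hcle' : (c : Int) ≤ (t.length : Int) := by
        rw [← hlen]; exact_mod_cast hcle
      have hone : (1 : Int) ≤ (t.length : Int) := by exact_mod_cast hn
      simp only [Int.min_def, Int.max_def]
      split_ifs <;> omega
    · push_neg at hkeys
      obtain ⟨l, hl, hn⟩ := hkeys
      have hn' : (l.lookup "start").isSome = false := by
        cases h : l.lookup "start" <;> simp [h] at hn ⊢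
      rw [pv_mapM_none ⟨l, hl, hn'⟩, pv_countLe_none pos ⟨l, hl, hn'⟩]
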